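-- pv_equiv track=rewrite | github.com/ShouyuWang08/PhantomMap | src/run_vlm.py | _extract_object_from_question
-- ===== SOURCE A (Python) =====
-- from typing import Iterable, Optional
--
-- def _extract_object_from_question(q: str) -> Optional[str]:
--     """POPE questions look like 'Is there a cat in the image?'. Extract 'cat'."""
--     q = q.strip().rstrip("?").lower()
--     for prefix in ("is there a ", "is there an ", "are there any "):
--         if q.startswith(prefix):
--             rest = q[len(prefix):]
--             if rest.endswith(" in the image"):
--                 rest = rest[: -len(" in the image")]
--             return rest.strip()
--     return None
-- ===== SOURCE B (Python) =====
-- def _extract_object_from_question(q):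
--     """Token-based parse: split the normalized question into words and work on the word list."""
--     toks = q.strip().rstrip("?").lower().split(" ")
--     head, body = toks[:3], toks[3:]
--     if head in (["is", "there", "a"], ["is", "there", "an"], ["are", "there", "any"]) and body:
--         if len(body) > 3 and body[-3:] == ["in", "the", "image"]:
--             body = body[:-3]
--         return " ".join(body).strip()
--     return None
-- ===== Notes on version B (the rewrite author's own statement) =====
-- stated objective: alternative
-- what changed: B parses the question at the word level: it splits the normalized string into space-separated tokens once and decides prefix/suffix by token-list comparisons, rebuilding the object with a join, instead of A's character-level prefix loop with slicing and an endswith trim.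
import Mathlib
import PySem

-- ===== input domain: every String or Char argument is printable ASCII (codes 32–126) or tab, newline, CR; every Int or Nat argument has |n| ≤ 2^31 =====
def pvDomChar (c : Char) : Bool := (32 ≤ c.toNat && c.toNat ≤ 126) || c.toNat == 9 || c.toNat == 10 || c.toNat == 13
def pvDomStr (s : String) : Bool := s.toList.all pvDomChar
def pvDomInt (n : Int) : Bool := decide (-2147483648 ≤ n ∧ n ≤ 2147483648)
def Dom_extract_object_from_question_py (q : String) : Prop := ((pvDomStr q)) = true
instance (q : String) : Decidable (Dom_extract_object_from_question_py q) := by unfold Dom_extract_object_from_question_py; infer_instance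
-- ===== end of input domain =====

-- B parses the question on the word level: it splits the normalized string into space-separated
-- tokens and compares/joins token lists instead of A's prefix loop with string slicing and an
-- endswith trim (objective: alternative).

-- ===== PORT A =====
-- hand port of str.rstrip("?") for the single-char argument "?": drop trailing '?' characters (exact)
def pyRstripQmark (s : String) : String :=
  String.ofList ((s.toList.reverse.dropWhile (· == '?')).reverse)

-- the for-loop over the three prefixes
def extractLoopA (q : String) : List String → Option String
  | [] => none
  | p :: ps =>
    if PySem.Str.startswith q p = true then
      let rest := PySem.Str.slice q (some (PySem.Str.len p)) none
      let rest := if PySem.Str.endswith rest " in the image" = true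
                  then PySem.Str.slice rest none (some (-(PySem.Str.len " in the image")))
                  else rest
      some (PySem.Str.strip rest)
    else extractLoopA q ps

def extract_object_from_question_py (q : String) : Option String :=
  let q1 := PySem.Str.lower (pyRstripQmark (PySem.Str.strip q))
  extractLoopA q1 ["is there a ", "is there an ", "are there any "]

-- ===== PORT B =====
-- Source B works on the token list q.split(" "); ported at the code-point level
-- (each token a List Char, split/join via PySem.Chars.splitOn/join — exact for the one-char sep " ")
def extract_object_from_question_py_alt (q : String) : Option String :=
  let q1 := PySem.Str.lower (pyRstripQmark (PySem.Str.strip q))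
  let toks := PySem.Chars.splitOn q1.toList [' ']
  let head := toks.take 3
  let body := toks.drop 3
  if (head = ["is".toList, "there".toList, "a".toList]
      ∨ head = ["is".toList, "there".toList, "an".toList]
      ∨ head = ["are".toList, "there".toList, "any".toList]) ∧ body ≠ [] then
    let body2 := if 3 < body.length ∧
        body.drop (body.length - 3) = ["in".toList, "the".toList, "image".toList] then
        body.take (body.length - 3)
      else body
    some (PySem.Str.strip (String.ofList (PySem.Chars.join [' '] body2)))
  else none

-- ===== PRECONDITION & SPEC =====
def Spec_extract_object_from_question_py (q : String) (out : Option String) : Prop := out = extract_object_from_question_py_alt q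
instance (q : String) (out : Option String) : Decidable (Spec_extract_object_from_question_py q out) := by unfold Spec_extract_object_from_question_py; infer_instance

-- ===== CLAIM (what is proved, stated in full; the proofs are below) =====
def Claim_equal_extract_object_from_question_py : Prop := ∀ (q : String), Dom_extract_object_from_question_py q → Spec_extract_object_from_question_py q (extract_object_from_question_py q)

-- ===== LEMMAS AND PROOFS =====

-- reference splitting function: Python s.split(" ") as a structural recursion
def mySplit : List Char → List (List Char)
  | [] => [[]]
  | c :: rest => if c = ' ' then [] :: mySplit rest else (mySplit rest).modifyHead (c :: ·)

lemma mySplit_ne_nil (l : List Char) : mySplit l ≠ [] := by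
  induction l with
  | nil => simp [mySplit]
  | cons c rest ih =>
    simp only [mySplit]
    split_ifs
    · simp
    · cases h : mySplit rest with
      | nil => exact absurd h ih
      | cons a t => simp [List.modifyHead]

lemma mySplit_space (rest : List Char) : mySplit (' ' :: rest) = [] :: mySplit rest := by
  simp [mySplit]

lemma mySplit_nonspace (c : Char) (rest : List Char) (hc : c ≠ ' ') :
    mySplit (c :: rest) = (mySplit rest).modifyHead (c :: ·) := by
  simp [mySplit, hc]

lemma go_eq (l : List Char) : ∀ (fuel : Nat) (cur : List Char) (acc : List (List Char)),
    l.length ≤ fuel →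
    PySem.Chars.splitOn.go [' '] fuel l cur acc
      = acc.reverse ++ (mySplit l).modifyHead (cur.reverse ++ ·) := by
  induction l with
  | nil =>
    intro fuel cur acc _
    cases fuel <;> simp [PySem.Chars.splitOn.go, mySplit]
  | cons c rest ih =>
    intro fuel cur acc hle
    simp only [List.length_cons] at hle
    cases fuel with
    | zero => omega
    | succ f =>
      rw [PySem.Chars.splitOn.go]
      by_cases hc : c = ' '
      · subst hc
        have hpre : [' '].isPrefixOf (' ' :: rest) = true := by simp [List.isPrefixOf]
        rw [if_pos hpre]
        simp only [List.length_cons, List.length_nil, List.drop_succ_cons, List.drop_zero]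
        rw [ih f [] ((List.reverse cur) :: acc) (by omega)]
        cases h : mySplit rest with
        | nil => exact absurd h (mySplit_ne_nil rest)
        | cons a t => simp [mySplit_space, h, List.modifyHead]
      · have hpre : [' '].isPrefixOf (c :: rest) = false := by
          simp [List.isPrefixOf]
          exact fun h => absurd h.symm hc
        rw [if_neg (by simp [hpre])]
        rw [ih f (c :: cur) acc (by omega)]
        cases h : mySplit rest with
        | nil => exact absurd h (mySplit_ne_nil rest)
        | cons a t => simp [mySplit_nonspace c rest hc, h, List.modifyHead]

lemma splitOn_eq_mySplit (l : List Char) : PySem.Chars.splitOn l [' '] = mySplit l := by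
  rw [PySem.Chars.splitOn, go_eq l (l.length + 1) [] [] (by omega)]
  cases h : mySplit l with
  | nil => exact absurd h (mySplit_ne_nil l)
  | cons a t => simp [List.modifyHead]

lemma mySplit_append_space (a b : List Char) :
    mySplit (a ++ ' ' :: b) = mySplit a ++ mySplit b := by
  induction a with
  | nil => simp [mySplit_space, mySplit]
  | cons c rest ih =>
    by_cases hc : c = ' '
    · subst hc; simp [List.cons_append, mySplit_space, ih]
    · simp only [List.cons_append, mySplit_nonspace c _ hc, ih]
      cases h : mySplit rest with
      | nil => exact absurd h (mySplit_ne_nil rest)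
      | cons x t => simp [List.modifyHead]

lemma ic_cons_cons (x y : List Char) (t : List (List Char)) :
    [' '].intercalate (x :: y :: t) = x ++ ' ' :: [' '].intercalate (y :: t) := by
  simp [List.intercalate, List.intersperse]

lemma join_cons (x : List Char) (ys : List (List Char)) (h : ys ≠ []) :
    PySem.Chars.join [' '] (x :: ys) = x ++ ' ' :: PySem.Chars.join [' '] ys := by
  cases ys with
  | nil => exact absurd rfl h
  | cons y t => simpa [PySem.Chars.join] using ic_cons_cons x y t

lemma join_cons_head (c : Char) (x : List Char) (t : List (List Char)) :
    PySem.Chars.join [' '] ((c :: x) :: t) = c :: PySem.Chars.join [' '] (x :: t) := by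
  cases t with
  | nil => simp [PySem.Chars.join, List.intercalate]
  | cons y t' => simp [PySem.Chars.join, ic_cons_cons]

lemma join_mySplit (l : List Char) : PySem.Chars.join [' '] (mySplit l) = l := by
  induction l with
  | nil => simp [mySplit, PySem.Chars.join, List.intercalate]
  | cons c rest ih =>
    by_cases hc : c = ' '
    · subst hc
      rw [mySplit_space, join_cons [] (mySplit rest) (mySplit_ne_nil rest), ih]
      simp
    · rw [mySplit_nonspace c rest hc]
      cases h : mySplit rest with
      | nil => exact absurd h (mySplit_ne_nil rest)
      | cons a t =>
        rw [h] at ih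
        simp [List.modifyHead, join_cons_head, ih]

lemma join_append (xs ys : List (List Char)) (hx : xs ≠ []) (hy : ys ≠ []) :
    PySem.Chars.join [' '] (xs ++ ys)
      = PySem.Chars.join [' '] xs ++ ' ' :: PySem.Chars.join [' '] ys := by
  induction xs with
  | nil => exact absurd rfl hx
  | cons x t ih =>
    cases t with
    | nil => simpa using join_cons x ys hy
    | cons a t' =>
      rw [List.cons_append, join_cons x ((a :: t') ++ ys) (by simp),
          join_cons x (a :: t') (by simp), ih (by simp)]
      simp

-- prefix side
lemma pref_token_of (pl r s : List Char) (hlen : (mySplit pl).length = 3)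
    (hs : s = pl ++ ' ' :: r) :
    (mySplit s).take 3 = mySplit pl ∧ (mySplit s).drop 3 = mySplit r ∧
      (mySplit s).drop 3 ≠ [] ∧ PySem.Chars.join [' '] ((mySplit s).drop 3) = r := by
  subst hs
  rw [mySplit_append_space]
  refine ⟨List.take_left' hlen, List.drop_left' hlen, ?_, ?_⟩
  · rw [List.drop_left' hlen]; exact mySplit_ne_nil r
  · rw [List.drop_left' hlen]; exact join_mySplit r

lemma pref_not_token (pl s : List Char) (hns : ¬ (pl ++ [' ']) <+: s) :
    ¬ ((mySplit s).take 3 = mySplit pl ∧ (mySplit s).drop 3 ≠ []) := by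
  rintro ⟨ht, hd⟩
  apply hns
  have hsplit : mySplit s = mySplit pl ++ (mySplit s).drop 3 := by
    conv_lhs => rw [← List.take_append_drop 3 (mySplit s)]
    rw [ht]
  have := join_mySplit s
  rw [hsplit, join_append _ _ (mySplit_ne_nil pl) hd, join_mySplit pl] at this
  refine ⟨PySem.Chars.join [' '] ((mySplit s).drop 3), ?_⟩
  simpa using this

-- suffix side
lemma suf_token_of (x r : List Char) (hx : r = x ++ ' ' :: "in the image".toList) :
    3 < (mySplit r).length ∧
      (mySplit r).drop ((mySplit r).length - 3) = mySplit "in the image".toList ∧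
      PySem.Chars.join [' '] ((mySplit r).take ((mySplit r).length - 3)) = x ∧
      r.take (r.length - 13) = x := by
  subst hx
  rw [mySplit_append_space]
  have hxne : 1 ≤ (mySplit x).length := by
    cases h : mySplit x with
    | nil => exact absurd h (mySplit_ne_nil x)
    | cons a t => simp
  have hS : (mySplit "in the image".toList).length = 3 := rfl
  have hlen : (mySplit x ++ mySplit "in the image".toList).length = (mySplit x).length + 3 := by
    rw [List.length_append, hS]
  have hsub : (mySplit x ++ mySplit "in the image".toList).length - 3 = (mySplit x).length := by
    omega
  refine ⟨by omega, ?_, ?_, ?_⟩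
  · rw [hsub]; exact List.drop_left
  · rw [hsub, List.take_left]; exact join_mySplit x
  · have h13 : (x ++ ' ' :: "in the image".toList).length - 13 = x.length := by
      simp
    rw [h13, List.take_left]

lemma suf_not_token (r : List Char) (hns : ¬ (' ' :: "in the image".toList) <:+ r) :
    ¬ (3 < (mySplit r).length ∧
        (mySplit r).drop ((mySplit r).length - 3) = mySplit "in the image".toList) := by
  rintro ⟨hlen, hd⟩
  apply hns
  have htne : (mySplit r).take ((mySplit r).length - 3) ≠ [] := by
    have : ((mySplit r).take ((mySplit r).length - 3)).length = (mySplit r).length - 3 := by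
      rw [List.length_take]; omega
    intro h; rw [h] at this; simp at this; omega
  have hsplit : mySplit r = (mySplit r).take ((mySplit r).length - 3)
      ++ mySplit "in the image".toList := by
    conv_lhs => rw [← List.take_append_drop ((mySplit r).length - 3) (mySplit r)]
    rw [hd]
  have hj := join_mySplit r
  rw [hsplit, join_append _ _ htne (mySplit_ne_nil "in the image".toList)] at hj
  have hjS : PySem.Chars.join [' '] (mySplit "in the image".toList) = "in the image".toList :=
    join_mySplit _
  rw [hjS] at hj
  exact ⟨_, by rw [← hj]⟩

-- A's per-branch value, written on char lists
def pvTrim13 (r : List Char) : List Char :=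
  if " in the image".toList <:+ r then r.take (r.length - 13) else r

lemma A_branch (p s : String) (ps : List String) (h : PySem.Str.startswith s p = true) :
    extractLoopA s (p :: ps)
      = some (PySem.Str.strip (String.ofList (pvTrim13 (s.toList.drop p.toList.length)))) := by
  have hpre : p.toList <+: s.toList :=
    (PySem.Chars.startswith_iff s.toList p.toList).mp
      (by rw [← PySem.Str.startswith_eq]; exact h)
  obtain ⟨r, hr⟩ := hpre
  have hdrop : s.toList.drop p.toList.length = r := by
    rw [← hr, List.drop_left]
  have hrest : (PySem.Str.slice s (some (PySem.Str.len p)) none).toList = r := by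
    rw [PySem.Str.toList_slice, PySem.Chars.slice_eq_listSlice, PySem.Str.len_eq,
        PySem.List.slice_from_natCast, ← hr, List.drop_left]
  have hend_iff : PySem.Str.endswith (PySem.Str.slice s (some (PySem.Str.len p)) none)
      " in the image" = true ↔ (" in the image" : String).toList <:+ r := by
    rw [PySem.Str.endswith_eq, hrest, PySem.Chars.endswith_iff]
  rw [hdrop]
  by_cases hb : (" in the image" : String).toList <:+ r
  · have hsuf13 : (" in the image" : String).toList.length = 13 := by decide
    have h13r : 13 ≤ r.length := hsuf13 ▸ hb.length_le
    have hA : extractLoopA s (p :: ps)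
        = some (PySem.Str.strip (PySem.Str.slice
            (PySem.Str.slice s (some (PySem.Str.len p)) none) none
            (some (-(PySem.Str.len " in the image"))))) := by
      simp only [extractLoopA, h, hend_iff.mpr hb, reduceIte]
    rw [hA]
    have hXs : (PySem.Str.slice (PySem.Str.slice s (some (PySem.Str.len p)) none) none
        (some (-(PySem.Str.len " in the image")))).toList = r.take (r.length - 13) := by
      rw [PySem.Str.toList_slice, PySem.Chars.slice_eq_listSlice, hrest,
          show PySem.Str.len " in the image" = 13 from by decide,
          PySem.List.slice_to_neg_ofNat r 13 (by omega)]
    have hT : pvTrim13 r = r.take (r.length - 13) := by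
      unfold pvTrim13; rw [if_pos hb]
    have hofl : (String.ofList (r.take (r.length - 13))).toList = r.take (r.length - 13) := by
      simp
    rw [hT, String.toList_inj.mp (hXs.trans hofl.symm)]
  · have hendf : PySem.Str.endswith (PySem.Str.slice s (some (PySem.Str.len p)) none)
        " in the image" = false :=
      eq_false_of_ne_true (fun c => hb (hend_iff.mp c))
    have hA : extractLoopA s (p :: ps)
        = some (PySem.Str.strip (PySem.Str.slice s (some (PySem.Str.len p)) none)) := by
      simp only [extractLoopA, h, hendf, reduceIte, Bool.false_eq_true, if_false]
    rw [hA]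
    have hT : pvTrim13 r = r := by
      unfold pvTrim13; rw [if_neg hb]
    have hofl : (String.ofList r).toList = r := by simp
    rw [hT, String.toList_inj.mp (hrest.trans hofl.symm)]

lemma A_skip (p s : String) (ps : List String) (h : ¬ PySem.Str.startswith s p = true) :
    extractLoopA s (p :: ps) = extractLoopA s ps := by
  simp only [extractLoopA, eq_false_of_ne_true h, Bool.false_eq_true, if_false]

-- B's body after the shared normalization, as a named function (definitionally B's port)
def bodyB (s : String) : Option String :=
  let toks := PySem.Chars.splitOn s.toList [' ']
  let head := toks.take 3
  let body := toks.drop 3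
  if (head = ["is".toList, "there".toList, "a".toList]
      ∨ head = ["is".toList, "there".toList, "an".toList]
      ∨ head = ["are".toList, "there".toList, "any".toList]) ∧ body ≠ [] then
    let body2 := if 3 < body.length ∧
        body.drop (body.length - 3) = ["in".toList, "the".toList, "image".toList] then
        body.take (body.length - 3)
      else body
    some (PySem.Str.strip (String.ofList (PySem.Chars.join [' '] body2)))
  else none

lemma altB_eq (q : String) :
    extract_object_from_question_py_alt q
      = bodyB (PySem.Str.lower (pyRstripQmark (PySem.Str.strip q))) := rfl

lemma hSS_eq : mySplit "in the image".toList = ["in".toList, "the".toList, "image".toList] := by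
  decide

-- a matched prefix: A's branch value equals B's token computation
lemma prefix_case (s : String) (ps : List String) (p pl : String)
    (hp : p.toList = pl.toList ++ [' '])
    (hlen3 : (mySplit pl.toList).length = 3)
    (hmem : mySplit pl.toList = ["is".toList, "there".toList, "a".toList]
      ∨ mySplit pl.toList = ["is".toList, "there".toList, "an".toList]
      ∨ mySplit pl.toList = ["are".toList, "there".toList, "any".toList])
    (h : PySem.Str.startswith s p = true) :
    extractLoopA s (p :: ps) = bodyB s := by
  have hpre : p.toList <+: s.toList :=
    (PySem.Chars.startswith_iff s.toList p.toList).mp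
      (by rw [← PySem.Str.startswith_eq]; exact h)
  obtain ⟨r, hr⟩ := hpre
  have hdrop : s.toList.drop p.toList.length = r := by rw [← hr, List.drop_left]
  have hs : s.toList = pl.toList ++ ' ' :: r := by
    rw [← hr, hp, List.append_assoc]; rfl
  obtain ⟨ht, hd, hne, hjoin⟩ := pref_token_of pl.toList r s.toList hlen3 hs
  have hcond : ((mySplit s.toList).take 3 = ["is".toList, "there".toList, "a".toList]
      ∨ (mySplit s.toList).take 3 = ["is".toList, "there".toList, "an".toList]
      ∨ (mySplit s.toList).take 3 = ["are".toList, "there".toList, "any".toList]) := by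
    rw [ht]; exact hmem
  rw [A_branch p s ps h, hdrop]
  unfold bodyB
  simp only [splitOn_eq_mySplit]
  rw [if_pos ⟨hcond, hne⟩, hd]
  by_cases hb : (" in the image" : String).toList <:+ r
  · obtain ⟨x, hx⟩ := hb
    have hx' : r = x ++ ' ' :: "in the image".toList := by
      rw [← hx]; rfl
    obtain ⟨hl3, hdS, hjx, htk⟩ := suf_token_of x r hx'
    have hTr : pvTrim13 r = x := by
      unfold pvTrim13
      rw [if_pos ⟨x, hx⟩, htk]
    rw [hTr, if_pos ⟨hl3, by rw [hdS, hSS_eq]⟩, hjx]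
  · have hb' : ¬ (' ' :: "in the image".toList) <:+ r := by
      intro c; exact hb (by exact c)
    have hTr : pvTrim13 r = r := by
      unfold pvTrim13; rw [if_neg hb]
    rw [hTr, if_neg (by
      intro c
      exact suf_not_token r hb' ⟨c.1, by rw [c.2, hSS_eq]⟩), join_mySplit]

-- no prefix matched: B's condition is false
lemma none_case (s : String)
    (h1 : ¬ PySem.Str.startswith s "is there a " = true)
    (h2 : ¬ PySem.Str.startswith s "is there an " = true)
    (h3 : ¬ PySem.Str.startswith s "are there any " = true) :
    bodyB s = none := by
  have np : ∀ (p pl : String), p.toList = pl.toList ++ [' '] →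
      ¬ PySem.Str.startswith s p = true →
      ¬ ((mySplit s.toList).take 3 = mySplit pl.toList ∧ (mySplit s.toList).drop 3 ≠ []) := by
    intro p pl hp hns
    apply pref_not_token
    intro hpre
    apply hns
    rw [PySem.Str.startswith_eq, PySem.Chars.startswith_iff, hp]
    exact hpre
  unfold bodyB
  simp only [splitOn_eq_mySplit]
  rw [if_neg]
  rintro ⟨hdisj, hne⟩
  rcases hdisj with hh | hh | hh
  · exact np "is there a " "is there a" rfl h1 ⟨by rw [hh]; decide, hne⟩
  · exact np "is there an " "is there an" rfl h2 ⟨by rw [hh]; decide, hne⟩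
  · exact np "are there any " "are there any" rfl h3 ⟨by rw [hh]; decide, hne⟩

lemma loops_eq (s : String) :
    extractLoopA s ["is there a ", "is there an ", "are there any "] = bodyB s := by
  by_cases h1 : PySem.Str.startswith s "is there a " = true
  · exact prefix_case s _ "is there a " "is there a" rfl rfl (Or.inl (by decide)) h1
  · rw [A_skip _ _ _ h1]
    by_cases h2 : PySem.Str.startswith s "is there an " = true
    · exact prefix_case s _ "is there an " "is there an" rfl rfl (Or.inr (Or.inl (by decide))) h2
    · rw [A_skip _ _ _ h2]
      by_cases h3 : PySem.Str.startswith s "are there any " = true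
      · exact prefix_case s _ "are there any " "are there any" rfl rfl
          (Or.inr (Or.inr (by decide))) h3
      · rw [A_skip _ _ _ h3]
        simp only [extractLoopA]
        exact (none_case s h1 h2 h3).symm

-- ===== VERDICT (by name: the statement is the Claim_ definition above) =====
theorem extract_object_from_question_py_spec : Claim_equal_extract_object_from_question_py := by
  intro q _
  unfold Spec_extract_object_from_question_py
  rw [altB_eq]
  unfold extract_object_from_question_py
  exact loops_eq _
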